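-- pv_equiv track=rewrite | github.com/spicydilly/advent-of-code-2024 | solutions/day09.py | get_free_chunks
-- ===== SOURCE A (Python) =====
-- from typing import List, Tuple, Dict
--
-- def get_free_chunks(disk_map: List[int]) -> List[Tuple[int, Tuple[int, int]]]:
--     """
--     Get the free chunks of the disk map
--
--     Args:
--         disk_map (str): The disk map to get the free chunks from
--
--     Returns:
--         List[int, Tuple[int, int]]: The size of each free chunk, with the
--             start and end of the chunk
--     """
--     free_ranges = []
--     start = None
--
--     for i, block in enumerate(disk_map):
--         if block == ".":
--             if start is None:  # Mark the start of a free chunk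
--                 start = i
--         else:
--             if start is not None:  # End of a free chunk
--                 free_ranges.append((abs(start - i), (start, i - 1)))
--                 start = None
--
--     return free_ranges
-- ===== SOURCE B (Python) =====
-- from typing import List, Tuple
--
--
-- def get_free_chunks(disk_map: List[int]) -> List[Tuple[int, Tuple[int, int]]]:
--     # Gap decomposition: list the occupied positions, then each free chunk is
--     # the gap between consecutive occupied positions (prev starts at -1, so the
--     # leading free run is covered; the trailing free run is never emitted).
--     occ = [i for i, b in enumerate(disk_map) if b != "."]
--     free_ranges = []
--     prev = -1
--     for p in occ:
--         if p - prev > 1: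
--             free_ranges.append((p - prev - 1, (prev + 1, p - 1)))
--         prev = p
--     return free_ranges
-- ===== Notes on version B (the rewrite author's own statement) =====
-- stated objective: alternative
-- what changed: Instead of a state machine tracking the optional start of a running '.' run, B first lists the occupied indices and then emits each free chunk as the gap between consecutive occupied positions (prev initialised to -1), which drops the trailing free run for free.
import Mathlib
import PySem

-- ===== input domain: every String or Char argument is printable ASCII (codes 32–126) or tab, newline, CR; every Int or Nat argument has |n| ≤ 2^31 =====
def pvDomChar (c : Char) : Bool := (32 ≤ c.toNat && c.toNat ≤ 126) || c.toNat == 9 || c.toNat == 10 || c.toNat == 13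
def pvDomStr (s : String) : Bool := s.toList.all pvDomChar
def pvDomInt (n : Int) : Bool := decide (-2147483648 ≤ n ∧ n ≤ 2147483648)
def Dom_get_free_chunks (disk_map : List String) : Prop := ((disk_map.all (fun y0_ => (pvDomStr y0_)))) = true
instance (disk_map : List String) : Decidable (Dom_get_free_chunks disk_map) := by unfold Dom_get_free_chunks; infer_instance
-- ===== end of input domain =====

-- B replaces A's optional-start state machine by a gap scan over the list of occupied
-- indices (objective: alternative decomposition, same cost); return values proved equal.

-- ===== PORT A =====
-- the `for i, block in enumerate(...)` loop of A, state = (free_ranges, start)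
def goA (l : List String) (i : Int) (start : Option Int)
    (acc : List (Int × (Int × Int))) : List (Int × (Int × Int)) :=
  match l with
  | [] => acc
  | b :: rest =>
    if b == "." then
      match start with
      | none => goA rest (i + 1) (some i) acc
      | some _ => goA rest (i + 1) start acc
    else
      match start with
      | some s => goA rest (i + 1) none (acc ++ [(|s - i|, (s, i - 1))])
      | none => goA rest (i + 1) none acc

def get_free_chunks (disk_map : List String) : List (Int × (Int × Int)) :=
  goA disk_map 0 none []

-- ===== PORT B =====
-- the comprehension `[i for i, b in enumerate(disk_map) if b != "."]`
def occB (l : List String) (i : Int) : List Int :=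
  match l with
  | [] => []
  | b :: rest => if b != "." then i :: occB rest (i + 1) else occB rest (i + 1)

-- the `for p in occ` loop of B, state = (free_ranges, prev)
def goB (occ : List Int) (prev : Int)
    (acc : List (Int × (Int × Int))) : List (Int × (Int × Int)) :=
  match occ with
  | [] => acc
  | p :: rest =>
    if p - prev > 1 then goB rest p (acc ++ [(p - prev - 1, (prev + 1, p - 1))])
    else goB rest p acc

def get_free_chunks_alt (disk_map : List String) : List (Int × (Int × Int)) :=
  goB (occB disk_map 0) (-1) []

-- ===== PRECONDITION & SPEC =====
def Spec_get_free_chunks (disk_map : List String) (out : List (Int × (Int × Int))) : Prop := out = get_free_chunks_alt disk_map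
instance (disk_map : List String) (out : List (Int × (Int × Int))) : Decidable (Spec_get_free_chunks disk_map out) := by unfold Spec_get_free_chunks; infer_instance

-- ===== CLAIM (what is proved, stated in full; the proofs are below) =====
def Claim_equal_get_free_chunks : Prop := ∀ (disk_map : List String), Dom_get_free_chunks disk_map → Spec_get_free_chunks disk_map (get_free_chunks disk_map)

-- ===== LEMMAS AND PROOFS =====

-- prev encodes A's state: `none` means the block just before index i is occupied
-- (prev = i - 1), `some s` means a free run started at s (prev = s - 1, s < i).
def prevOf (start : Option Int) (i : Int) : Int :=
  match start with
  | none => i - 1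
  | some s => s - 1

theorem goA_eq_goB (l : List String) :
    ∀ (i : Int) (start : Option Int) (acc : List (Int × (Int × Int))),
      (∀ s, start = some s → s < i) →
      goA l i start acc = goB (occB l i) (prevOf start i) acc := by
  induction l with
  | nil => intro i start acc _; cases start <;> simp [goA, occB, goB]
  | cons b rest ih =>
    intro i start acc hs
    by_cases hb : b = "."
    · subst hb
      cases start with
      | none =>
        simp only [goA, occB, prevOf]
        simp only [beq_self_eq_true, if_true, bne_self_eq_false, Bool.false_eq_true,
          if_false]
        have := ih (i + 1) (some i) acc (by intro s h; cases h; omega)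
        simpa [prevOf] using this
      | some s =>
        have hsi : s < i := hs s rfl
        simp only [goA, occB, prevOf]
        simp only [beq_self_eq_true, if_true, bne_self_eq_false, Bool.false_eq_true,
          if_false]
        have := ih (i + 1) (some s) acc (by intro t h; cases h; omega)
        simpa [prevOf] using this
    · have hb' : (b == ".") = false := by simpa using hb
      cases start with
      | none =>
        simp only [goA, occB, goB, prevOf, hb', Bool.false_eq_true, if_false, bne,
          Bool.not_false, if_true]
        have hcond : ¬ (i - (i - 1) > 1) := by omega
        rw [if_neg hcond]
        have := ih (i + 1) none acc (by intro s h; cases h)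
        simpa [prevOf] using this
      | some s =>
        have hsi : s < i := hs s rfl
        simp only [goA, occB, goB, prevOf, hb', Bool.false_eq_true, if_false, bne,
          Bool.not_false, if_true]
        have hcond : i - (s - 1) > 1 := by omega
        rw [if_pos hcond]
        have habs : |s - i| = i - (s - 1) - 1 := by
          rw [abs_of_nonpos (by omega)]; omega
        have harg : s - 1 + 1 = s := by omega
        rw [habs, harg]
        have := ih (i + 1) none (acc ++ [(i - (s - 1) - 1, (s, i - 1))])
          (by intro t h; cases h)
        simpa [prevOf] using this

-- ===== VERDICT (by name: the statement is the Claim_ definition above) =====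
theorem get_free_chunks_spec : Claim_equal_get_free_chunks := by
  intro disk_map _
  unfold Spec_get_free_chunks get_free_chunks get_free_chunks_alt
  have := goA_eq_goB disk_map 0 none [] (by intro s h; cases h)
  simpa [prevOf] using this
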